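-- pv_equiv track=rewrite | github.com/nyucel/blm2010 | 160401056.py | abdegerler
-- ===== SOURCE A (Python) =====
-- def abdegerler(length,list):
--     abdegerler_ = []
--     abdegerler_.append(sum(list))
--     for i in range(1, 7):
--         sonuc=0
--         for j in range(length):
--             sonuc += (j + 1) ** i * list[j]
--         abdegerler_.append(sonuc)
--     return abdegerler_
-- ===== SOURCE B (Python) =====
-- def abdegerler(length, list):
--     a1 = a2 = a3 = a4 = a5 = a6 = 0
--     for j in range(length):
--         v = list[j]
--         w = j + 1
--         p1 = w * v
--         p2 = p1 * w
--         p3 = p2 * w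
--         p4 = p3 * w
--         p5 = p4 * w
--         p6 = p5 * w
--         a1 += p1; a2 += p2; a3 += p3; a4 += p4; a5 += p5; a6 += p6
--     return [sum(list), a1, a2, a3, a4, a5, a6]
-- ===== Notes on version B (the rewrite author's own statement) =====
-- stated objective: alternative
-- what changed: Replaces A's six separate passes over the list (each recomputing (j+1)**i by exponentiation) by one single pass maintaining six accumulators with powers of j+1 built incrementally by multiplication.
import Mathlib
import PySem

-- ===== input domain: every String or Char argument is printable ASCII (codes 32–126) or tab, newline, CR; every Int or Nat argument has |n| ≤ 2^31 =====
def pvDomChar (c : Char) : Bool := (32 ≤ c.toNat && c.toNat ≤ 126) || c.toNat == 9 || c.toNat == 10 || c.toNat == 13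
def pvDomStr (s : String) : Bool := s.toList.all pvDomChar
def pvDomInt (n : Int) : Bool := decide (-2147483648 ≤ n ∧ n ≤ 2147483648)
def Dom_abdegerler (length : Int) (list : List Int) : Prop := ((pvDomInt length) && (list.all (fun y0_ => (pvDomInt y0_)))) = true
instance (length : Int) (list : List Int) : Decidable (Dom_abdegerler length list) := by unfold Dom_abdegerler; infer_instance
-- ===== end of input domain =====

-- B replaces A's six separate weighted passes by one single pass with six accumulators and incremental powers (alternative decomposition, same results).


-- ===== PORT A =====
-- sum(list) → list.sum; list[j] → pyGetD (in range by Pre_); range(1,7)/range(length) → pyRange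
def abdegerler (length : Int) (list : List Int) : List Int :=
  (PySem.List.pyRange 1 7 1).foldl
    (fun acc i =>
      acc ++ [(PySem.List.pyRange 0 length 1).foldl
        (fun sonuc j => sonuc + (j + 1) ^ i.toNat * PySem.List.pyGetD list j 0) 0])
    [list.sum]

-- ===== PORT B =====
-- single pass, six scalar accumulators, powers of w = j+1 built by repeated multiplication
def abdegerler_alt (length : Int) (list : List Int) : List Int :=
  let s := (PySem.List.pyRange 0 length 1).foldl
    (fun (a : Int × Int × Int × Int × Int × Int) j =>
      let v := PySem.List.pyGetD list j 0
      let w := j + 1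
      let p1 := w * v
      let p2 := p1 * w
      let p3 := p2 * w
      let p4 := p3 * w
      let p5 := p4 * w
      let p6 := p5 * w
      (a.1 + p1, a.2.1 + p2, a.2.2.1 + p3, a.2.2.2.1 + p4, a.2.2.2.2.1 + p5, a.2.2.2.2.2 + p6))
    (0, 0, 0, 0, 0, 0)
  [list.sum, s.1, s.2.1, s.2.2.1, s.2.2.2.1, s.2.2.2.2.1, s.2.2.2.2.2]

-- ===== PRECONDITION & SPEC =====
-- Pre_ excludes exactly the inputs where A raises IndexError (length exceeding the list length).
def Pre_abdegerler (length : Int) (list : List Int) : Prop := length ≤ (list.length : Int)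
instance (length : Int) (list : List Int) : Decidable (Pre_abdegerler length list) := by
  unfold Pre_abdegerler; infer_instance
def pvWitness_abdegerler : Int × List Int := (3, [2, -1, 5])
def Spec_abdegerler (length : Int) (list : List Int) (out : List Int) : Prop := out = abdegerler_alt length list
instance (length : Int) (list : List Int) (out : List Int) : Decidable (Spec_abdegerler length list out) := by unfold Spec_abdegerler; infer_instance

-- ===== CLAIM (what is proved, stated in full; the proofs are below) =====
def Claim_equal_abdegerler : Prop := ∀ (length : Int) (list : List Int), Dom_abdegerler length list → Pre_abdegerler length list → Spec_abdegerler length list (abdegerler length list)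

-- ===== LEMMAS AND PROOFS =====

-- A's inner fold for a fixed exponent i, over an arbitrary index list
def pvFoldA (g : Int → Int) (i : Nat) (R : List Int) (s : Int) : Int :=
  R.foldl (fun sonuc j => sonuc + (j + 1) ^ i * g j) s

-- B's fused fold over the same index list
def pvFoldB (g : Int → Int) (R : List Int) (a : Int × Int × Int × Int × Int × Int) :
    Int × Int × Int × Int × Int × Int :=
  R.foldl
    (fun a j =>
      let v := g j
      let w := j + 1
      let p1 := w * v
      let p2 := p1 * w
      let p3 := p2 * w
      let p4 := p3 * w
      let p5 := p4 * w
      let p6 := p5 * w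
      (a.1 + p1, a.2.1 + p2, a.2.2.1 + p3, a.2.2.2.1 + p4, a.2.2.2.2.1 + p5, a.2.2.2.2.2 + p6))
    a

theorem pvFoldB_eq (g : Int → Int) (R : List Int)
    (a1 a2 a3 a4 a5 a6 : Int) :
    pvFoldB g R (a1, a2, a3, a4, a5, a6) =
      (pvFoldA g 1 R a1, pvFoldA g 2 R a2, pvFoldA g 3 R a3,
       pvFoldA g 4 R a4, pvFoldA g 5 R a5, pvFoldA g 6 R a6) := by
  induction R generalizing a1 a2 a3 a4 a5 a6 with
  | nil => rfl
  | cons j R ih =>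
      simp only [pvFoldB, pvFoldA, List.foldl_cons] at *
      rw [ih]
      simp only [Prod.mk.injEq]
      refine ⟨?_, ?_, ?_, ?_, ?_, ?_⟩ <;> (congr 1; ring)

-- ===== VERDICT (by name: the statement is the Claim_ definition above) =====
theorem abdegerler_spec : Claim_equal_abdegerler := by
  intro length list _ _
  unfold Spec_abdegerler abdegerler abdegerler_alt
  have h17 : PySem.List.pyRange 1 7 1 = [1, 2, 3, 4, 5, 6] := by decide
  rw [h17]
  simp only [List.foldl_cons, List.foldl_nil, List.nil_append, List.cons_append]
  have hB := pvFoldB_eq (fun j => PySem.List.pyGetD list j 0)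
      (PySem.List.pyRange 0 length 1) 0 0 0 0 0 0
  simp only [pvFoldB, pvFoldA] at hB
  simp only [show (1:Int).toNat = 1 from rfl, show (2:Int).toNat = 2 from rfl,
    show (3:Int).toNat = 3 from rfl, show (4:Int).toNat = 4 from rfl,
    show (5:Int).toNat = 5 from rfl, show (6:Int).toNat = 6 from rfl]
  rw [hB]
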